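-- pv_equiv track=rewrite | github.com/khelmric/gcp-org-chart | reporting_tools.py | create_overall_findings_summary_html
-- ===== SOURCE A (Python) =====
-- def create_overall_findings_summary_html(overall_findings_count):
--     # Define status labels for readability
--     statuses = [
--         "<span class='status-green'>OK</span>",
--         "<span class='status-orange'>WARNING</span>",
--         "<span class='status-red'>CRITICAL</span>"
--     ]
--
--     # Initialize containers for components contributing to each status
--     status_components = {status: [] for status in statuses}
--     status_totals = {status: 0 for status in statuses}
--
--     # Process each component and its findings
--     for component, ok, warning, critical in overall_findings_count:
--         counts = [ok, warning, critical]
--         for i, count in enumerate(counts):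
--             if count > 0:
--                 status = statuses[i]
--                 status_components[status].append(f"{component} ({count})")
--                 status_totals[status] += count
--
--     # Build HTML table
--     html = """
--     <div class="content-result-container">
--         <div class="result_row">
--             <span class="result_label">Components</span>
--         </div>
--         <table class="report-table" border="1" cellspacing="0" cellpadding="6" style="border-collapse: collapse; text-align: left;">
--             <tr style="background-color: #f2f2f2;">
--                 <th>Component name</th>
--                 <th>Status</th>
--                 <th>Count</th>
--             </tr>
--     """
--
--     # Add rows only if there are findings
--     for status in statuses:
--         total = status_totals[status]
--         if total > 0:
--             components_str = ", ".join(status_components[status])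
--             html += f"""
--             <tr>
--                 <td>{components_str}</td>
--                 <td>{status}</td>
--                 <td>{total}</td>
--             </tr>
--             """
--
--     html += "</table></div>"
--     return html
-- ===== SOURCE B (Python) =====
-- def create_overall_findings_summary_html(overall_findings_count):
--     statuses = [
--         "<span class='status-green'>OK</span>",
--         "<span class='status-orange'>WARNING</span>",
--         "<span class='status-red'>CRITICAL</span>"
--     ]
--
--     html = """
--     <div class="content-result-container">
--         <div class="result_row">
--             <span class="result_label">Components</span>
--         </div>
--         <table class="report-table" border="1" cellspacing="0" cellpadding="6" style="border-collapse: collapse; text-align: left;">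
--             <tr style="background-color: #f2f2f2;">
--                 <th>Component name</th>
--                 <th>Status</th>
--                 <th>Count</th>
--             </tr>
--     """
--
--     # Status-major: one pass over the components per status, no dicts at all.
--     for i, status in enumerate(statuses):
--         parts = []
--         total = 0
--         for component, ok, warning, critical in overall_findings_count:
--             count = (ok, warning, critical)[i]
--             if count > 0:
--                 parts.append(f"{component} ({count})")
--                 total += count
--         if total > 0:
--             components_str = ", ".join(parts)
--             html += f"""
--             <tr>
--                 <td>{components_str}</td>
--                 <td>{status}</td>
--                 <td>{total}</td>
--             </tr>
--             """
--
--     html += "</table></div>"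
--     return html
-- ===== Notes on version B (the rewrite author's own statement) =====
-- stated objective: simpler
-- what changed: Replaces the two status-keyed dicts filled component-major with a status-major loop: for each status in order, one direct pass over the components accumulates the parts list and total, so no dictionaries or enumerate-indexed bookkeeping remain.
import Mathlib
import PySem

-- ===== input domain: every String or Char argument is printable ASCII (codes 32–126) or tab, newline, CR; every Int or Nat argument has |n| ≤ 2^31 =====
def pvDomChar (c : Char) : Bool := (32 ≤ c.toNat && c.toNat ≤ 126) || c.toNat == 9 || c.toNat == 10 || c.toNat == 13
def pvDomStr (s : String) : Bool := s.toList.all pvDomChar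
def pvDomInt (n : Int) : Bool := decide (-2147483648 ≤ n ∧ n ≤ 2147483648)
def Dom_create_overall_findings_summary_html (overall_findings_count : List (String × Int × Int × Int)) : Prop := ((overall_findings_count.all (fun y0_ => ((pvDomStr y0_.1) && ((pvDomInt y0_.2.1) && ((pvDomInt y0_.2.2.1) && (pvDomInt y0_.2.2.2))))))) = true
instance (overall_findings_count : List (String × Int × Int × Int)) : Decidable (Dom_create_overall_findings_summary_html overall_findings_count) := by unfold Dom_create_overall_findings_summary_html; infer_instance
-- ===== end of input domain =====

-- B replaces A's component-major fill of two status-keyed dicts by a status-major loop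
-- (one direct pass over the components per status); same output, objective: simpler.

-- ===== PORT A =====
-- shared HTML/status literals (byte-identical in Source A and Source B)
def pvStatuses : List String :=
  ["<span class='status-green'>OK</span>",
   "<span class='status-orange'>WARNING</span>",
   "<span class='status-red'>CRITICAL</span>"]

def pvHeader : String := "\n    <div class=\"content-result-container\">\n        <div class=\"result_row\">\n            <span class=\"result_label\">Components</span>\n        </div>\n        <table class=\"report-table\" border=\"1\" cellspacing=\"0\" cellpadding=\"6\" style=\"border-collapse: collapse; text-align: left;\">\n            <tr style=\"background-color: #f2f2f2;\">\n                <th>Component name</th>\n                <th>Status</th>\n                <th>Count</th>\n            </tr>\n    "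

-- the f-string row appended for one status (identical in Source A and Source B)
def pvRow (components_str status : String) (total : Int) : String :=
  "\n            <tr>\n                <td>" ++ components_str ++ "</td>\n                <td>" ++ status ++ "</td>\n                <td>" ++ PySem.Int.toStr total ++ "</td>\n            </tr>\n            "

-- A's initial dicts: {status: [] for status in statuses} and {status: 0 for status in statuses}
def pvInitC : PySem.Dict String (List String) :=
  PySem.Dict.ofList (pvStatuses.map (fun s => (s, ([] : List String))))
def pvInitT : PySem.Dict String Int :=
  PySem.Dict.ofList (pvStatuses.map (fun s => (s, (0 : Int))))

-- one iteration of A's component loop (inner 'for i, count in enumerate(counts)' included)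
def pvStepA (st : PySem.Dict String (List String) × PySem.Dict String Int)
    (e : String × Int × Int × Int) :
    PySem.Dict String (List String) × PySem.Dict String Int :=
  (PySem.List.enumerate [e.2.1, e.2.2.1, e.2.2.2]).foldl
    (fun st ic =>
      if ic.2 > 0 then
        -- statuses[i]: i ∈ {0,1,2} is always in range, so the total pyGetD is exact here
        let status := PySem.List.pyGetD pvStatuses ic.1 ""
        -- both dicts are pre-initialized with every status key, so Python's d[status]
        -- never raises: modify/getD with the initialization defaults are exact here
        (st.1.modify status [] (· ++ [e.1 ++ " (" ++ PySem.Int.toStr ic.2 ++ ")"]),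
         st.2.modify status 0 (· + ic.2))
      else st) st

def create_overall_findings_summary_html (overall_findings_count : List (String × Int × Int × Int)) : String :=
  let st := overall_findings_count.foldl pvStepA (pvInitC, pvInitT)
  let html := pvHeader
  let html := pvStatuses.foldl (fun html status =>
    let total := st.2.getD status 0
    if total > 0 then
      html ++ pvRow (PySem.Str.join ", " (st.1.getD status [])) status total
    else html) html
  html ++ "</table></div>"

-- ===== PORT B =====
-- one iteration of B's inner component pass for status index i ('(ok, warning, critical)[i]')
def pvStepB (i : Int) (acc : List String × Int) (e : String × Int × Int × Int) :
    List String × Int :=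
  let count := PySem.List.pyGetD [e.2.1, e.2.2.1, e.2.2.2] i 0
  if count > 0 then (acc.1 ++ [e.1 ++ " (" ++ PySem.Int.toStr count ++ ")"], acc.2 + count)
  else acc

def create_overall_findings_summary_html_alt (overall_findings_count : List (String × Int × Int × Int)) : String :=
  let html := pvHeader
  let html := (PySem.List.enumerate pvStatuses).foldl (fun html is =>
    let r := overall_findings_count.foldl (pvStepB is.1) ([], 0)
    if r.2 > 0 then html ++ pvRow (PySem.Str.join ", " r.1) is.2 r.2 else html) html
  html ++ "</table></div>"

-- ===== PRECONDITION & SPEC =====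
def Spec_create_overall_findings_summary_html (overall_findings_count : List (String × Int × Int × Int)) (out : String) : Prop := out = create_overall_findings_summary_html_alt overall_findings_count
instance (overall_findings_count : List (String × Int × Int × Int)) (out : String) : Decidable (Spec_create_overall_findings_summary_html overall_findings_count out) := by unfold Spec_create_overall_findings_summary_html; infer_instance

-- ===== CLAIM (what is proved, stated in full; the proofs are below) =====
def Claim_equal_create_overall_findings_summary_html : Prop := ∀ (overall_findings_count : List (String × Int × Int × Int)), Dom_create_overall_findings_summary_html overall_findings_count → Spec_create_overall_findings_summary_html overall_findings_count (create_overall_findings_summary_html overall_findings_count)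

-- ===== LEMMAS AND PROOFS =====

-- One step of A's dict fold, observed at status key j, is one step of B's inner pass for index j.
set_option maxHeartbeats 2000000 in
theorem pvStep_fact (dc : PySem.Dict String (List String)) (dt : PySem.Dict String Int)
    (e : String × Int × Int × Int) (j : Nat) (hj : j < 3) :
    ((pvStepA (dc, dt) e).1.getD (pvStatuses[j]!) [],
     (pvStepA (dc, dt) e).2.getD (pvStatuses[j]!) 0)
      = pvStepB (j : Int) (dc.getD (pvStatuses[j]!) [], dt.getD (pvStatuses[j]!) 0) e := by
  have g0 : PySem.List.pyGetD pvStatuses (0:Int) "" = pvStatuses[0]! := rfl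
  have g1 : PySem.List.pyGetD pvStatuses ((0:Int)+1) "" = pvStatuses[1]! := rfl
  have g2 : PySem.List.pyGetD pvStatuses ((0:Int)+1+1) "" = pvStatuses[2]! := rfl
  have b0 : ∀ a b c : Int, PySem.List.pyGetD [a,b,c] (((0:Nat)):Int) 0 = a := fun a b c => rfl
  have b1 : ∀ a b c : Int, PySem.List.pyGetD [a,b,c] (((1:Nat)):Int) 0 = b := fun a b c => rfl
  have b2 : ∀ a b c : Int, PySem.List.pyGetD [a,b,c] (((2:Nat)):Int) 0 = c := fun a b c => rfl
  have ne01 : pvStatuses[0]! ≠ pvStatuses[1]! := by decide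
  have ne02 : pvStatuses[0]! ≠ pvStatuses[2]! := by decide
  have ne12 : pvStatuses[1]! ≠ pvStatuses[2]! := by decide
  interval_cases j <;>
    simp only [pvStepA, pvStepB, PySem.List.enumerate_cons, PySem.List.enumerate_nil,
      List.foldl, g0, g1, g2, b0, b1, b2] <;>
    split_ifs <;>
    (simp_all [PySem.Dict.getD_modify]; try tauto)

-- A's whole fold, observed at status key j, is B's whole inner pass for index j.
theorem pvFold_getD (l : List (String × Int × Int × Int))
    (dc : PySem.Dict String (List String)) (dt : PySem.Dict String Int)
    (j : Nat) (hj : j < 3) :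
    ((l.foldl pvStepA (dc, dt)).1.getD (pvStatuses[j]!) [],
     (l.foldl pvStepA (dc, dt)).2.getD (pvStatuses[j]!) 0)
      = l.foldl (pvStepB (j : Int)) (dc.getD (pvStatuses[j]!) [], dt.getD (pvStatuses[j]!) 0) := by
  induction l generalizing dc dt with
  | nil => rfl
  | cons e t ih =>
    rw [List.foldl_cons, List.foldl_cons, ← pvStep_fact dc dt e j hj]
    have := ih (pvStepA (dc, dt) e).1 (pvStepA (dc, dt) e).2
    simpa using this

-- ===== VERDICT (by name: the statement is the Claim_ definition above) =====
theorem create_overall_findings_summary_html_spec : Claim_equal_create_overall_findings_summary_html := by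
  intro l _
  unfold Spec_create_overall_findings_summary_html
  have h0 := pvFold_getD l pvInitC pvInitT 0 (by norm_num)
  have h1 := pvFold_getD l pvInitC pvInitT 1 (by norm_num)
  have h2 := pvFold_getD l pvInitC pvInitT 2 (by norm_num)
  rw [show pvInitC.getD (pvStatuses[0]!) [] = [] from rfl,
      show pvInitT.getD (pvStatuses[0]!) 0 = 0 from rfl] at h0
  rw [show pvInitC.getD (pvStatuses[1]!) [] = [] from rfl,
      show pvInitT.getD (pvStatuses[1]!) 0 = 0 from rfl] at h1
  rw [show pvInitC.getD (pvStatuses[2]!) [] = [] from rfl,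
      show pvInitT.getD (pvStatuses[2]!) 0 = 0 from rfl] at h2
  have h0a := congrArg Prod.fst h0; have h0b := congrArg Prod.snd h0
  have h1a := congrArg Prod.fst h1; have h1b := congrArg Prod.snd h1
  have h2a := congrArg Prod.fst h2; have h2b := congrArg Prod.snd h2
  dsimp only [] at h0a h0b h1a h1b h2a h2b
  norm_num [pvStatuses] at h0a h0b h1a h1b h2a h2b
  simp only [create_overall_findings_summary_html, create_overall_findings_summary_html_alt,
    pvStatuses, List.foldl, PySem.List.enumerate_cons, PySem.List.enumerate_nil]
  norm_num [h0a, h0b, h1a, h1b, h2a, h2b]
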